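-- pv_equiv track=rewrite | github.com/scmmmh/webrpg | src/webrpg/calculator.py | process_unary
-- ===== SOURCE A (Python) =====
-- def process_unary(tokens):
--     """Processes any unary "-" tokens.
--
--     :param tokens: The tokens to process
--     :type tokens: ``list``
--     :return: The processes tokens
--     :rtype: ``list``
--     """
--     output = []
--     modifier = None
--     for idx in range(0, len(tokens)):
--         if (idx == 0 or tokens[idx - 1][0] == 'op') and idx < len(tokens) - 1 and tokens[idx][0] == 'op' and tokens[idx][1] == '-' and tokens[idx + 1][0] == 'val':
--             modifier = '-'
--         elif modifier:
--             if tokens[idx][0] == 'val':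
--                 if modifier == '-':
--                     output.append(('val', str(int(tokens[idx][1]) * -1)))
--             modifier = None
--         else:
--             output.append(tokens[idx])
--     return output
-- ===== SOURCE B (Python) =====
-- def _is_unary(tokens, i):
--     return (i == 0 or tokens[i - 1][0] == 'op') and i < len(tokens) - 1 and tokens[i][0] == 'op' and tokens[i][1] == '-' and tokens[i + 1][0] == 'val'
--
--
-- def process_unary(tokens):
--     """Processes any unary "-" tokens (two-token consuming rewrite)."""
--     output = []
--     i = 0
--     while i < len(tokens):
--         if _is_unary(tokens, i):
--             output.append(('val', str(int(tokens[i + 1][1]) * -1)))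
--             i += 2
--         else:
--             output.append(tokens[i])
--             i += 1
--     return output
-- ===== Notes on version B (the rewrite author's own statement) =====
-- stated objective: alternative
-- what changed: Replaced A's stateful for-loop (a 'modifier' flag carried across two iterations) with a while-loop that consumes the whole '-'+'val' pair in one step, appending the negated value and advancing the index by 2.
import Mathlib
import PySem

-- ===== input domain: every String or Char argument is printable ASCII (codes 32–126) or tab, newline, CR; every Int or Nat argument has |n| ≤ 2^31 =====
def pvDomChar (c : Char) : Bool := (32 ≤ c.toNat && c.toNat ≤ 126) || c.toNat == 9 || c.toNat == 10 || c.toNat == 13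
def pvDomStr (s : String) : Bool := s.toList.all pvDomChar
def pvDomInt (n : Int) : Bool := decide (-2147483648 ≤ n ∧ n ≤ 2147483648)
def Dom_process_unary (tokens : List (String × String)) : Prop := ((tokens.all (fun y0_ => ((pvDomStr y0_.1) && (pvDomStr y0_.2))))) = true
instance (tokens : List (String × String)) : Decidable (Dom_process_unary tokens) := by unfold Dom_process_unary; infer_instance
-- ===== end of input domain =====

-- B rewrites A's modifier-flag for-loop as a while-loop that consumes each '-'+'val' pair in one step (objective: alternative decomposition, same cost).

-- the unary-minus detection condition, shared verbatim by both Pythons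
-- (`tokens[i]` here is always an in-range non-negative index, so List.getD is exact Python indexing;
--  short-circuit: when i = 0 the `tokens[i-1]` access is never made, and `i-1` is only read when i ≠ 0)
def unaryCond (tokens : List (String × String)) (i : Nat) : Bool :=
  (decide (i = 0) || (tokens.getD (i - 1) ("", "")).1 == "op") &&
    decide (i + 1 < tokens.length) &&
    (tokens.getD i ("", "")).1 == "op" && (tokens.getD i ("", "")).2 == "-" &&
    (tokens.getD (i + 1) ("", "")).1 == "val"

-- ===== PORT A =====
-- the body of A's for-loop; the state is (output, modifier), carried across iterations.
-- int(s) is PySem.Int.ofStr?; inside Pre_ it is always `some` (outside, Python raises ValueError),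
-- so `.getD 0` is only a totaliser, never reached on admitted inputs.
def pA_step (tokens : List (String × String)) (st : List (String × String) × Option String)
    (idx : Nat) : List (String × String) × Option String :=
  if unaryCond tokens idx then
    (st.1, some "-")
  else
    match st.2 with
    | some m =>
        ((if (tokens.getD idx ("", "")).1 == "val" then
            (if m == "-" then
               st.1 ++ [("val", PySem.Int.toStr (((PySem.Int.ofStr? (tokens.getD idx ("", "")).2).getD 0) * (-1)))]
             else st.1)
          else st.1), none)
    | none => (st.1 ++ [tokens.getD idx ("", "")], st.2)

-- `for idx in range(0, len(tokens))` over the state (output, modifier = None initially)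
def process_unary (tokens : List (String × String)) : List (String × String) :=
  ((List.range tokens.length).foldl (pA_step tokens) ([], none)).1

-- ===== PORT B =====
-- B's while-loop: on the unary pattern append the negated value and skip two tokens, else copy one.
-- `fuel` only bounds the number of iterations (the loop itself stops via `i < len(tokens)`);
-- fuel = tokens.length always suffices since i grows by at least 1 per iteration.
def pB_loop (tokens : List (String × String)) :
    Nat → Nat → List (String × String) → List (String × String)
  | 0, _, output => output
  | fuel + 1, i, output =>
      if i < tokens.length then
        if unaryCond tokens i then
          pB_loop tokens fuel (i + 2)
            (output ++ [("val", PySem.Int.toStr (((PySem.Int.ofStr? (tokens.getD (i + 1) ("", "")).2).getD 0) * (-1)))])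
        else
          pB_loop tokens fuel (i + 1) (output ++ [tokens.getD i ("", "")])
      else output

def process_unary_alt (tokens : List (String × String)) : List (String × String) :=
  pB_loop tokens tokens.length 0 []

-- ===== PRECONDITION & SPEC =====
-- Pre_ excludes exactly the inputs where Python A raises ValueError: a detected unary '-' whose
-- following 'val' token's string is not int()-parsable (my B raises there too).
def Pre_process_unary (tokens : List (String × String)) : Prop :=
  ∀ i : Nat, i < tokens.length → unaryCond tokens i = true →
    (PySem.Int.ofStr? (tokens.getD (i + 1) ("", "")).2).isSome = true
instance (tokens : List (String × String)) : Decidable (Pre_process_unary tokens) := by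
  unfold Pre_process_unary; infer_instance

def pvWitness_process_unary : (List (String × String)) :=
  [("op", "-"), ("val", "3"), ("op", "+"), ("val", "4")]

def Spec_process_unary (tokens : List (String × String)) (out : List (String × String)) : Prop := out = process_unary_alt tokens
instance (tokens : List (String × String)) (out : List (String × String)) : Decidable (Spec_process_unary tokens out) := by unfold Spec_process_unary; infer_instance

-- ===== CLAIM (what is proved, stated in full; the proofs are below) =====
def Claim_equal_process_unary : Prop := ∀ (tokens : List (String × String)), Dom_process_unary tokens → Pre_process_unary tokens → Spec_process_unary tokens (process_unary tokens)

-- ===== LEMMAS AND PROOFS =====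

-- when the pattern fires at i, the next token is a 'val', so the pattern cannot fire at i+1
lemma unaryCond_next_false {tokens : List (String × String)} {i : Nat}
    (h : unaryCond tokens i = true) : unaryCond tokens (i + 1) = false := by
  simp only [unaryCond, Bool.and_eq_true, beq_iff_eq, decide_eq_true_eq,
    List.getD_eq_getElem?_getD] at h
  simp [unaryCond, h.2]

lemma unaryCond_next_lt {tokens : List (String × String)} {i : Nat}
    (h : unaryCond tokens i = true) : i + 1 < tokens.length := by
  simp only [unaryCond, Bool.and_eq_true, decide_eq_true_eq] at h
  exact h.1.1.1.2

-- main invariant: A's remaining fold (indices i, i+1, …, len-1, no pending modifier)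
-- equals B's loop from i, for any sufficient fuel
lemma fold_eq_loop (tokens : List (String × String)) :
    ∀ (f i : Nat) (out : List (String × String)), tokens.length ≤ i + f →
      ((List.range' i (tokens.length - i)).foldl (pA_step tokens) (out, none)).1 =
        pB_loop tokens f i out := by
  intro f
  induction f with
  | zero =>
    intro i out hle
    have h0 : tokens.length - i = 0 := by omega
    simp [h0, pB_loop]
  | succ f ih =>
    intro i out hle
    by_cases hi : i < tokens.length
    · have hsplit : tokens.length - i = (tokens.length - (i + 1)) + 1 := by omega
      rw [hsplit, List.range'_succ, List.foldl_cons]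
      by_cases hc : unaryCond tokens i = true
      · -- A: sets modifier; next index is the 'val', where the modifier fires
        have h1 : i + 1 < tokens.length := unaryCond_next_lt hc
        have hsplit2 : tokens.length - (i + 1) = (tokens.length - (i + 2)) + 1 := by omega
        rw [hsplit2, List.range'_succ, List.foldl_cons]
        have hval : (tokens[i + 1]?.getD ("", "")).1 = "val" := by
          simp only [unaryCond, Bool.and_eq_true, beq_iff_eq,
            List.getD_eq_getElem?_getD] at hc
          exact hc.2
        have hstep1 : pA_step tokens (out, none) i = (out, some "-") := by
          simp [pA_step, hc]
        have hstep2 : pA_step tokens (out, some "-") (i + 1) =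
            (out ++ [("val", PySem.Int.toStr (((PySem.Int.ofStr? (tokens.getD (i + 1) ("", "")).2).getD 0) * (-1)))], none) := by
          simp [pA_step, unaryCond_next_false hc, hval]
        rw [hstep1, hstep2, ih (i + 2) _ (by omega)]
        simp [pB_loop, hi, hc]
      · have hstep : pA_step tokens (out, none) i = (out ++ [tokens.getD i ("", "")], none) := by
          simp [pA_step, hc]
        rw [hstep, ih (i + 1) _ (by omega)]
        simp [pB_loop, hi, hc]
    · have h0 : tokens.length - i = 0 := by omega
      simp [h0, pB_loop, hi]

-- ===== VERDICT (by name: the statement is the Claim_ definition above) =====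
theorem process_unary_spec : Claim_equal_process_unary := by
  intro tokens _ _
  unfold Spec_process_unary process_unary process_unary_alt
  have h := fold_eq_loop tokens tokens.length 0 [] (by omega)
  simpa [List.range_eq_range'] using h
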